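-- pv_equiv track=rewrite | github.com/dfielding14/SFunctor | sfunctor/io/extract.py | Morton_int_to_array
-- ===== SOURCE A (Python) =====
-- def Morton_int_to_array(n):
--     """
--     Convert an integer (0 <= n < 2^18) into a three-element array [a, b, c]
--     by de-interleaving its 18-bit binary representation.
--
--     The 18-bit number is written as:
--         b17 b16 ... b0
--     Then we assign:
--       - a gets bits at positions 0, 3, 6, 9, 12, 15 (least significant bits of each coordinate)
--       - b gets bits at positions 1, 4, 7, 10, 13, 16
--       - c gets bits at positions 2, 5, 8, 11, 14, 17 (most significant bits of each coordinate)
--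
--     Each coordinate is a 6-bit number (range 0 to 63), so the resulting array
--     represents a point in a 64x64x64 grid.
--     """
--     if n < 0 or n >= (1 << 18):
--         raise ValueError("n must be in the range 0 to 2^18 - 1 (i.e. 0 <= n < 262144).")
--
--     a = b = c = 0
--     # There are 6 bits for each coordinate since 18/3 = 6.
--     for i in range(6):
--         # Extract the bit for coordinate a from position (3*i + 0)
--         a |= ((n >> (3 * i + 0)) & 1) << i
--         # Extract the bit for coordinate b from position (3*i + 1)
--         b |= ((n >> (3 * i + 1)) & 1) << i
--         # Extract the bit for coordinate c from position (3*i + 2)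
--         c |= ((n >> (3 * i + 2)) & 1) << i
--
--     return [c, b, a]
-- ===== SOURCE B (Python) =====
-- def Morton_int_to_array(n):
--     """Bit-parallel de-interleave of an 18-bit Morton code into [c, b, a]."""
--     if n < 0 or n >= (1 << 18):
--         raise ValueError("n must be in the range 0 to 2^18 - 1 (i.e. 0 <= n < 262144).")
--
--     def compact(x):
--         # keep every third bit (positions 0,3,6,9,12,15), then gather
--         x &= 0o111111                      # 0b001001001001001001
--         x = (x ^ (x >> 2)) & 0o70707       # 0b000111000111000111 -> pairs at 0-1,6-7,12-13
--         x = (x ^ (x >> 4)) & 0o170017      # 0b001111000000001111 -> nibble at 0-3, pair at 12-13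
--         x = (x ^ (x >> 8)) & 0o77          # 6 contiguous bits
--         return x
--
--     a = compact(n)
--     b = compact(n >> 1)
--     c = compact(n >> 2)
--     return [c, b, a]
-- ===== Notes on version B (the rewrite author's own statement) =====
-- stated objective: faster
-- what changed: Replaced A's per-bit extraction loop (one bit ORed into each coordinate per iteration) with three fixed bit-parallel compaction chains: mask every third bit, then gather with a short fixed sequence of shift-xor-mask steps.
import Mathlib
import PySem

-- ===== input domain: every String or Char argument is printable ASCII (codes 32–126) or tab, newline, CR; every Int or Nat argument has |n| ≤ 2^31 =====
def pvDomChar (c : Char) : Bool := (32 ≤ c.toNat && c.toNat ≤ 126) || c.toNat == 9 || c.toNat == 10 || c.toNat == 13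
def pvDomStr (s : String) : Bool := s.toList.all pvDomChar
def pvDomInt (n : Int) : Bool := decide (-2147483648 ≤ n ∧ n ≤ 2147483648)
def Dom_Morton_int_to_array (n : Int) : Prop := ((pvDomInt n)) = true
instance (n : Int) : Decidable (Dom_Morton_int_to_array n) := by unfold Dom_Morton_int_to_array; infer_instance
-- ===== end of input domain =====

-- B replaces A's 6-iteration per-bit extraction loop with three fixed bit-parallel
-- mask/shift compaction chains (fewer operations, same exact results).

-- ===== PORT A =====
-- Python A: guard (raises ValueError outside 0 ≤ n < 2^18, excluded by Pre_), then
-- a loop `for i in range(6)` or-ing single extracted bits into a, b, c; returns [c, b, a].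
def Morton_int_to_array (n : Int) : List Int :=
  let s := (PySem.List.pyRange 0 6 1).foldl (fun (st : Int × Int × Int) (i : Int) =>
    (PySem.Int.bor st.1 ((PySem.Int.band (n >>> (3 * i + 0).toNat) 1) <<< i.toNat),
     PySem.Int.bor st.2.1 ((PySem.Int.band (n >>> (3 * i + 1).toNat) 1) <<< i.toNat),
     PySem.Int.bor st.2.2 ((PySem.Int.band (n >>> (3 * i + 2).toNat) 1) <<< i.toNat)))
    ((0 : Int), (0 : Int), (0 : Int))
  [s.2.2, s.2.1, s.1]

-- ===== PORT B =====
-- Source B's helper `compact`: keep every third bit, then gather with fixed shift-xor-mask steps.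
def pvCompact (x0 : Int) : Int :=
  let x1 := PySem.Int.band x0 0o111111
  let x2 := PySem.Int.band (PySem.Int.bxor x1 (x1 >>> (2 : Nat))) 0o70707
  let x3 := PySem.Int.band (PySem.Int.bxor x2 (x2 >>> (4 : Nat))) 0o170017
  PySem.Int.band (PySem.Int.bxor x3 (x3 >>> (8 : Nat))) 0o77

def Morton_int_to_array_alt (n : Int) : List Int :=
  let a := pvCompact n
  let b := pvCompact (n >>> (1 : Nat))
  let c := pvCompact (n >>> (2 : Nat))
  [c, b, a]

-- ===== PRECONDITION & SPEC =====
-- Pre_: exactly A's guard — outside 0 ≤ n < 2^18 the Python raises ValueError.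
def Pre_Morton_int_to_array (n : Int) : Prop := 0 ≤ n ∧ n < 262144
instance (n : Int) : Decidable (Pre_Morton_int_to_array n) := by unfold Pre_Morton_int_to_array; infer_instance
def pvWitness_Morton_int_to_array : Int := 12345
def Spec_Morton_int_to_array (n : Int) (out : List Int) : Prop := out = Morton_int_to_array_alt n
instance (n : Int) (out : List Int) : Decidable (Spec_Morton_int_to_array n out) := by unfold Spec_Morton_int_to_array; infer_instance

-- ===== CLAIM (what is proved, stated in full; the proofs are below) =====
def Claim_equal_Morton_int_to_array : Prop := ∀ (n : Int), Dom_Morton_int_to_array n → Pre_Morton_int_to_array n → Spec_Morton_int_to_array n (Morton_int_to_array n)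

-- ===== LEMMAS AND PROOFS =====
lemma pvRange6 : PySem.List.pyRange 0 6 1 = [0, 1, 2, 3, 4, 5] := by decide

-- The two ports agree on every nonnegative input (both only ever read bits 0–17;
-- bitwise equality is proved coordinate-wise via Nat.testBit extensionality).
lemma pvMain (m : Nat) : Morton_int_to_array (m : Int) = Morton_int_to_array_alt (m : Int) := by
  unfold Morton_int_to_array Morton_int_to_array_alt pvCompact
  rw [pvRange6]
  simp only [List.foldl_cons, List.foldl_nil]
  simp only [show ((3:Int) * 0 + 0).toNat = 0 from rfl, show ((3:Int) * 0 + 1).toNat = 1 from rfl,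
    show ((3:Int) * 0 + 2).toNat = 2 from rfl, show ((3:Int) * 1 + 0).toNat = 3 from rfl,
    show ((3:Int) * 1 + 1).toNat = 4 from rfl, show ((3:Int) * 1 + 2).toNat = 5 from rfl,
    show ((3:Int) * 2 + 0).toNat = 6 from rfl, show ((3:Int) * 2 + 1).toNat = 7 from rfl,
    show ((3:Int) * 2 + 2).toNat = 8 from rfl, show ((3:Int) * 3 + 0).toNat = 9 from rfl,
    show ((3:Int) * 3 + 1).toNat = 10 from rfl, show ((3:Int) * 3 + 2).toNat = 11 from rfl,
    show ((3:Int) * 4 + 0).toNat = 12 from rfl, show ((3:Int) * 4 + 1).toNat = 13 from rfl,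
    show ((3:Int) * 4 + 2).toNat = 14 from rfl, show ((3:Int) * 5 + 0).toNat = 15 from rfl,
    show ((3:Int) * 5 + 1).toNat = 16 from rfl, show ((3:Int) * 5 + 2).toNat = 17 from rfl,
    show ((0:Int)).toNat = 0 from rfl, show ((1:Int)).toNat = 1 from rfl,
    show ((2:Int)).toNat = 2 from rfl, show ((3:Int)).toNat = 3 from rfl,
    show ((4:Int)).toNat = 4 from rfl, show ((5:Int)).toNat = 5 from rfl]
  simp only [show (0 : Int) = ((0 : Nat) : Int) from rfl,
    show (1 : Int) = ((1 : Nat) : Int) from rfl,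
    show (37449 : Int) = ((37449 : Nat) : Int) from rfl,
    show (29127 : Int) = ((29127 : Nat) : Int) from rfl,
    show (61455 : Int) = ((61455 : Nat) : Int) from rfl,
    show (63 : Int) = ((63 : Nat) : Int) from rfl,
    ← Int.natCast_shiftRight, ← Int.natCast_shiftLeft,
    PySem.Int.band_natCast, PySem.Int.bor_natCast, PySem.Int.bxor_natCast,
    List.cons.injEq, and_true, Nat.cast_inj]
  refine ⟨?_, ?_, ?_⟩ <;>
  · apply Nat.eq_of_testBit_eq
    intro j
    rcases Nat.lt_or_ge j 6 with hj | hj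
    · interval_cases j <;>
      · simp only [Nat.testBit_or, Nat.testBit_and, Nat.testBit_xor, Nat.testBit_shiftLeft,
          Nat.testBit_shiftRight]
        norm_num
        simp only [Nat.testBit_eq_decide_div_mod_eq]
        norm_num
    · have h63 : Nat.testBit 63 j = false :=
        Nat.testBit_lt_two_pow (by calc (63:Nat) < 2^6 := by norm_num
                                     _ ≤ 2^j := Nat.pow_le_pow_right (by norm_num) hj)
      have hone : ∀ k : Nat, k ≤ 5 → Nat.testBit 1 (j - k) = false := fun k hk =>
        Nat.testBit_lt_two_pow (by
          have h1 : 1 ≤ j - k := by omega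
          calc (1:Nat) < 2^1 := by norm_num
            _ ≤ 2^(j-k) := Nat.pow_le_pow_right (by norm_num) h1)
      simp only [Nat.testBit_or, Nat.testBit_and, Nat.testBit_xor, Nat.testBit_shiftLeft,
        Nat.testBit_shiftRight, h63, Bool.and_false, Bool.or_false,
        hone 0 (by norm_num), hone 1 (by norm_num), hone 2 (by norm_num),
        hone 3 (by norm_num), hone 4 (by norm_num), hone 5 (by norm_num),
        Nat.zero_testBit]

-- ===== VERDICT (by name: the statement is the Claim_ definition above) =====
theorem Morton_int_to_array_spec : Claim_equal_Morton_int_to_array := by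
  intro n _ hpre
  unfold Spec_Morton_int_to_array
  have h : n = ((n.toNat : Nat) : Int) := (Int.toNat_of_nonneg hpre.1).symm
  rw [h]
  exact pvMain n.toNat
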